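-- pv_equiv track=rewrite | github.com/ashwinnaresh/AML-NLP-Course | Cricket Match Summary Generation/ANN/feature_functions.py | f14
-- ===== SOURCE A (Python) =====
-- def f14(h):
-- 	'''
-- 	Event : Catch_dropped
-- 	'''
-- 	for i in h:
-- 		if i == 'catch':
-- 			if 'drop' in h[h.index(i):]:
-- 				return 1
-- 			elif 'OUT' not in h[:h.index(i)]:
-- 				return 1
-- 			elif 'miss' in h[:h.index(i)]:
-- 				return 1
-- 		elif i == 'caught' and 'OUT' not in h[:h.index(i)]:
-- 			return 1
-- 	return 0
-- ===== SOURCE B (Python) =====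
-- def f14(h):
--     '''
--     Event : Catch_dropped
--     '''
--     # One forward pass with state flags; no slicing, no .index, no early returns.
--     seen_catch = seen_caught = False
--     out_before_catch = miss_before_catch = drop_after_catch = out_before_caught = False
--     for x in h:
--         if x == 'catch':
--             seen_catch = True
--         elif x == 'caught':
--             seen_caught = True
--         elif x == 'drop':
--             if seen_catch:
--                 drop_after_catch = True
--         elif x == 'OUT':
--             if not seen_catch:
--                 out_before_catch = True
--             if not seen_caught:
--                 out_before_caught = True
--         elif x == 'miss':
--             if not seen_catch:
--                 miss_before_catch = True
--     hit = (seen_catch and (drop_after_catch or not out_before_catch or miss_before_catch)) \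
--         or (seen_caught and not out_before_caught)
--     return 1 if hit else 0
-- ===== Notes on version B (the rewrite author's own statement) =====
-- stated objective: alternative
-- what changed: A scans the list and, on each 'catch'/'caught' hit, re-derives the first index with h.index and re-scans prefix/suffix slices; B makes one forward pass carrying six boolean flags (seen catch/caught, OUT/miss before first catch, drop after first catch, OUT before first caught) and evaluates a single final condition - no slicing, no .index, no early returns.
import Mathlib
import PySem

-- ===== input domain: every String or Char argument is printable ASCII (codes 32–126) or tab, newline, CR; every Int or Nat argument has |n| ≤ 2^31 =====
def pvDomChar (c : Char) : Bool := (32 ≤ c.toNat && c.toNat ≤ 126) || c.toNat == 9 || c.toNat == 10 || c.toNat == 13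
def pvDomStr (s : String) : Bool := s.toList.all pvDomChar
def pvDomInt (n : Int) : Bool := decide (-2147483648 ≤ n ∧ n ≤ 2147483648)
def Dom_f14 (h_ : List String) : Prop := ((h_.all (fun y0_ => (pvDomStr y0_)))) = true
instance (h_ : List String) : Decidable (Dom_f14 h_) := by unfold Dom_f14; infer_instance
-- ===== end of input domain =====

-- B replaces A's scan-with-slices (each 'catch'/'caught' hit re-scans prefixes/suffixes via
-- h.index and slicing) by a single forward pass carrying six boolean flags (objective: simpler,
-- one linear pass, no slicing/index).

-- ===== PORT A =====
-- loop body of A: scans l (a suffix of full); h.index(i) is taken in the FULL list, as in Python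
def f14Go (full : List String) : List String → Int
  | [] => 0
  | i :: rest =>
    if i = "catch" then
      let idx : Int := (((PySem.List.index? full i).getD 0 : Nat) : Int)
      if "drop" ∈ PySem.List.slice full (some idx) none then 1
      else if "OUT" ∉ PySem.List.slice full none (some idx) then 1
      else if "miss" ∈ PySem.List.slice full none (some idx) then 1
      else f14Go full rest
    else if i = "caught" ∧
        "OUT" ∉ PySem.List.slice full none
          (some (((PySem.List.index? full i).getD 0 : Nat) : Int)) then 1
    else f14Go full rest

def f14 (h_ : List String) : Int := f14Go h_ h_

-- ===== PORT B =====
-- B's for-loop: structural recursion carrying the six flags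
-- (seenCatch, seenCaught, outBeforeCatch, missBeforeCatch, dropAfterCatch, outBeforeCaught)
def f14AltGo : List String → Bool → Bool → Bool → Bool → Bool → Bool →
    Bool × Bool × Bool × Bool × Bool × Bool
  | [], c, g, oc, mc, dc, og => (c, g, oc, mc, dc, og)
  | x :: rest, c, g, oc, mc, dc, og =>
    if x = "catch" then f14AltGo rest true g oc mc dc og
    else if x = "caught" then f14AltGo rest c true oc mc dc og
    else if x = "drop" then f14AltGo rest c g oc mc (if c then true else dc) og
    else if x = "OUT" then
      f14AltGo rest c g (if c then oc else true) mc dc (if g then og else true)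
    else if x = "miss" then f14AltGo rest c g oc (if c then mc else true) dc og
    else f14AltGo rest c g oc mc dc og

def f14_alt (h_ : List String) : Int :=
  let s := f14AltGo h_ false false false false false false
  let hit : Bool := (s.1 && (s.2.2.2.2.1 || !s.2.2.1 || s.2.2.2.1)) || (s.2.1 && !s.2.2.2.2.2)
  if hit then 1 else 0

-- ===== PRECONDITION & SPEC =====
def Spec_f14 (h_ : List String) (out : Int) : Prop := out = f14_alt h_
instance (h_ : List String) (out : Int) : Decidable (Spec_f14 h_ out) := by unfold Spec_f14; infer_instance

-- ===== CLAIM (what is proved, stated in full; the proofs are below) =====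
def Claim_equal_f14 : Prop := ∀ (h_ : List String), Dom_f14 h_ → Spec_f14 h_ (f14 h_)

-- ===== LEMMAS AND PROOFS =====

-- closed form of B's fold: each final flag in terms of the input list and the incoming flags
theorem f14AltGo_eq (l : List String) (c g oc mc dc og : Bool) :
    f14AltGo l c g oc mc dc og =
      (c || decide ("catch" ∈ l),
       g || decide ("caught" ∈ l),
       oc || (!c && decide ("OUT" ∈ l.takeWhile (· ≠ "catch"))),
       mc || (!c && decide ("miss" ∈ l.takeWhile (· ≠ "catch"))),
       dc || decide ("drop" ∈ (if c then l else l.dropWhile (· ≠ "catch"))),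
       og || (!g && decide ("OUT" ∈ l.takeWhile (· ≠ "caught")))) := by
  induction l generalizing c g oc mc dc og with
  | nil => simp [f14AltGo]
  | cons x rest ih =>
    by_cases h1 : x = "catch"
    · subst h1
      show f14AltGo rest true g oc mc dc og = _
      rw [ih]
      cases c <;> simp
    · by_cases h2 : x = "caught"
      · subst h2
        show f14AltGo rest c true oc mc dc og = _
        rw [ih]
        cases c <;> cases g <;> simp
      · by_cases h3 : x = "drop"
        · subst h3
          show f14AltGo rest c g oc mc (if c then true else dc) og = _
          rw [ih]
          cases c <;> simp
        · by_cases h4 : x = "OUT"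
          · subst h4
            show f14AltGo rest c g (if c then oc else true) mc dc (if g then og else true) = _
            rw [ih]
            cases c <;> cases g <;> simp
          · by_cases h5 : x = "miss"
            · subst h5
              show f14AltGo rest c g oc (if c then mc else true) dc og = _
              rw [ih]
              cases c <;> simp
            · rw [show f14AltGo (x :: rest) c g oc mc dc og = f14AltGo rest c g oc mc dc og
                from by simp [f14AltGo, h1, h2, h3, h4, h5], ih]
              cases c <;> cases g <;>
                simp [h1, h2, Ne.symm h1, Ne.symm h2, Ne.symm h3, Ne.symm h4, Ne.symm h5]

-- first-occurrence index: take/drop at (idxOf? a l).getD 0 is takeWhile/dropWhile (· ≠ a), when a ∈ l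
theorem take_idxOf_eq_takeWhile (a : String) (l : List String) (h : a ∈ l) :
    l.take ((l.idxOf? a).getD 0) = l.takeWhile (· ≠ a) ∧
    l.drop ((l.idxOf? a).getD 0) = l.dropWhile (· ≠ a) := by
  induction l with
  | nil => cases h
  | cons x rest ih =>
    by_cases hx : x = a
    · subst hx
      simp [List.idxOf?_cons]
    · have hmem : a ∈ rest := by
        rcases List.mem_cons.mp h with h' | h'
        · exact absurd h'.symm hx
        · exact h'
      have ⟨ih1, ih2⟩ := ih hmem
      have hidx : ((x :: rest).idxOf? a) = (rest.idxOf? a).map (· + 1) := by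
        simp [List.idxOf?_cons, hx]
      obtain ⟨k, hk⟩ := Option.isSome_iff_exists.mp (List.isSome_idxOf?.mpr hmem)
      rw [hidx, hk]
      simp only [Option.map_some, Option.getD_some]
      rw [hk] at ih1 ih2
      simp only [Option.getD_some] at ih1 ih2
      simp [hx, ih1, ih2]

-- one-step unfolding of A's loop on a cons cell
theorem f14Go_cons (full : List String) (i : String) (rest : List String) :
    f14Go full (i :: rest) =
      (if i = "catch" then
        (let idx : Int := (((PySem.List.index? full i).getD 0 : Nat) : Int)
         if "drop" ∈ PySem.List.slice full (some idx) none then 1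
         else if "OUT" ∉ PySem.List.slice full none (some idx) then 1
         else if "miss" ∈ PySem.List.slice full none (some idx) then 1
         else f14Go full rest)
      else if i = "caught" ∧
          "OUT" ∉ PySem.List.slice full none
            (some (((PySem.List.index? full i).getD 0 : Nat) : Int)) then 1
      else f14Go full rest) := rfl

-- A's per-element conditions depend only on `full`, so the scan of a suffix `l` returns 1
-- exactly when the disjunction over first indices holds with membership over `l`.
def f14CatchCond (h_ : List String) : Bool :=
  let n : Nat := (List.idxOf? "catch" h_).getD 0
  decide ("drop" ∈ h_.drop n) || decide ("OUT" ∉ h_.take n) || decide ("miss" ∈ h_.take n)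

def f14CaughtCond (h_ : List String) : Bool :=
  decide ("OUT" ∉ h_.take ((List.idxOf? "caught" h_).getD 0))

theorem f14Go_eq (full : List String) (l : List String) :
    f14Go full l =
      if (decide ("catch" ∈ l) && f14CatchCond full)
          || (decide ("caught" ∈ l) && f14CaughtCond full) then 1 else 0 := by
  induction l with
  | nil => simp [f14Go]
  | cons i rest ih =>
    rw [f14Go_cons]
    by_cases hc : i = "catch"
    · subst hc
      rw [if_pos rfl]
      simp only [f14CatchCond, f14CaughtCond, Bool.or_eq_true, Bool.and_eq_true,
        decide_eq_true_eq, List.mem_cons] at ih ⊢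
      simp only [pysem] at ih ⊢
      by_cases hcc : ("drop" ∈ List.drop ((List.idxOf? "catch" full).getD 0) full ∨
          "OUT" ∉ List.take ((List.idxOf? "catch" full).getD 0) full ∨
          "miss" ∈ List.take ((List.idxOf? "catch" full).getD 0) full)
      · split_ifs <;> first | rfl | tauto
      · rw [ih]
        split_ifs <;> first | rfl | tauto
    · rw [if_neg hc]
      by_cases hg : i = "caught"
      · subst hg
        simp only [f14CatchCond, f14CaughtCond, Bool.or_eq_true, Bool.and_eq_true,
          decide_eq_true_eq, List.mem_cons] at ih ⊢
        simp only [pysem] at ih ⊢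
        by_cases hgc : "OUT" ∉ List.take ((List.idxOf? "caught" full).getD 0) full
        · split_ifs <;> first | rfl | tauto
        · rw [ih]
          have hne : ¬ ("catch" : String) = "caught" := by decide
          split_ifs <;> first | rfl | tauto
      · rw [if_neg (fun h => hg h.1)]
        rw [ih]
        refine (if_congr ?_ rfl rfl).symm
        simp only [Bool.or_eq_true, Bool.and_eq_true, decide_eq_true_eq, List.mem_cons]
        have h1 : ¬ ("catch" : String) = i := fun h => hc h.symm
        have h3 : ¬ ("caught" : String) = i := fun h => hg h.symm
        tauto

-- ===== VERDICT (by name: the statement is the Claim_ definition above) =====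
theorem f14_spec : Claim_equal_f14 := by
  intro h_ _
  unfold Spec_f14 f14 f14_alt
  rw [f14Go_eq, f14AltGo_eq]
  simp only [Bool.false_or, Bool.not_false, Bool.true_and]
  by_cases hc : "catch" ∈ h_
  · by_cases hg : "caught" ∈ h_
    · have ⟨tc, dcm⟩ := take_idxOf_eq_takeWhile "catch" h_ hc
      have ⟨tg, _⟩ := take_idxOf_eq_takeWhile "caught" h_ hg
      simp [f14CatchCond, f14CaughtCond, hc, hg, tc, dcm, tg]
      try tauto
    · have ⟨tc, dcm⟩ := take_idxOf_eq_takeWhile "catch" h_ hc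
      simp [f14CatchCond, hc, hg, tc, dcm]
      try tauto
  · by_cases hg : "caught" ∈ h_
    · have ⟨tg, _⟩ := take_idxOf_eq_takeWhile "caught" h_ hg
      simp [f14CaughtCond, hc, hg, tg]
    · simp [hc, hg]
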